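-- pv_equiv track=rewrite | github.com/liuxinyuanxy/QRCode-generator | Hydra.py | get_format_inf
-- ===== SOURCE A (Python) =====
-- error_correction_level = 'L'
--
-- def get_format_inf(mask):  #获得格式信息串
--     level_code = {'L': '01', 'M': '00', 'Q': '11', 'H': '10'}
--     format_inf = level_code[error_correction_level] + mask
--     Mx = []
--     for i in format_inf:
--         Mx.append(int(i))
--     for i in range(10):
--         Mx.append(0)
--     Gx = [1, 0, 1, 0, 0, 1, 1, 0, 1, 1, 1]
--     length = len(Mx)
--     for i in range(length - 10):  # 求余
--         if Mx[i] != 0: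
--             for j in range(11):
--                 Mx[i + j] ^= Gx[j]
--     for i in Mx[length - 10:]:
--         format_inf = format_inf + str(i)
--     return '{:015b}'.format(int(format_inf, 2) ^ int('101010000010010', 2))
-- ===== SOURCE B (Python) =====
-- error_correction_level = 'L'
--
-- def get_format_inf(mask):  # format info string via integer bit arithmetic
--     level_code = {'L': '01', 'M': '00', 'Q': '11', 'H': '10'}
--     data = int(level_code[error_correction_level] + mask, 2)
--     n = len(mask) + 2
--     g = 0b10100110111  # the generator polynomial Gx as one integer
--     d = data << 10
--     for shift in range(n - 1, -1, -1):
--         if (d >> (shift + 10)) & 1: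
--             d ^= g << shift
--     return '{:015b}'.format(((data << 10) | d) ^ 0b101010000010010)
-- ===== Notes on version B (the rewrite author's own statement) =====
-- stated objective: alternative
-- what changed: The BCH remainder is computed with integer bit arithmetic (one shifted-generator XOR per position on a single int) instead of a Python list of bit ints updated 11 elements at a time, and the final string is assembled by shift/or instead of string concatenation and reparsing with int(...,2).
import Mathlib
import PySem

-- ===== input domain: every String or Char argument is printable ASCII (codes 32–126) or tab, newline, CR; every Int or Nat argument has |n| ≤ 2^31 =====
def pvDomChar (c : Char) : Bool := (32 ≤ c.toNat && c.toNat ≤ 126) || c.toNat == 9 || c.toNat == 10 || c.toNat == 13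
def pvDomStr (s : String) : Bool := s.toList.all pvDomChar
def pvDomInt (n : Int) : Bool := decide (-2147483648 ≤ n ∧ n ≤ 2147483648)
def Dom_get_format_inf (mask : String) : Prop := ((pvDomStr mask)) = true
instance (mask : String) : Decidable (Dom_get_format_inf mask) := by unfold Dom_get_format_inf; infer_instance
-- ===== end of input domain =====

-- B computes the BCH remainder with integer bit arithmetic on a single Nat instead of A's list of
-- bit ints updated in 11-element windows: an alternative data structure, not claimed faster.

-- int(s, 2): exact for nonempty strings of binary digits, the only int(...,2) inputs reachable
-- inside Pre_; Python's further forms (sign, spaces, underscores, base prefix) never arise there.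
def pvInt2? (s : List Char) : Option Nat :=
  if s ≠ [] ∧ s.all (fun c => c == '0' || c == '1') then
    some (s.foldl (fun a c => 2 * a + (if c == '1' then 1 else 0)) 0)
  else none

-- '{:015b}'.format(v) / format(v, '015b') for v ≥ 0 (both arguments here are nonnegative)
def pvFormat015b (v : Nat) : String :=
  let ds := Nat.toDigits 2 v
  String.ofList (List.replicate (15 - ds.length) '0' ++ ds)

-- ===== PORT A =====
def pvGx : List Int := [1, 0, 1, 0, 0, 1, 1, 0, 1, 1, 1]
def pvStepInner (i : Int) (m2 : List Int) (j : Int) : List Int :=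
  PySem.List.pySetD m2 (i + j)
    (PySem.Int.bxor (PySem.List.pyGetD m2 (i + j) 0) (PySem.List.pyGetD pvGx j 0))
def pvStepA (m : List Int) (i : Int) : List Int :=
  if PySem.List.pyGetD m i 0 ≠ 0 then (PySem.List.pyRange 0 11 1).foldl (pvStepInner i) m else m
def pvG : Nat := 1335
def pvStepB (d : Nat) (shift : Int) : Nat :=
  if (d >>> (shift.toNat + 10)) &&& 1 = 1 then d ^^^ (pvG <<< shift.toNat) else d

def get_format_inf (mask : String) : String :=
  let format_inf : List Char := "01".toList ++ mask.toList
  let Mx? : Option (List Int) := format_inf.foldl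
    (fun acc c => acc.bind (fun l => (PySem.Int.ofStr? (String.ofList [c])).map (fun v => l ++ [v])))
    (some [])
  match Mx? with
  | none => ""
  | some Mx0 =>
    let Mx1 := (PySem.List.pyRange 0 10 1).foldl (fun l _ => l ++ [(0 : Int)]) Mx0
    let length : Nat := Mx1.length
    let Mx2 := (PySem.List.pyRange 0 ((length : Int) - 10) 1).foldl pvStepA Mx1
    let tail := PySem.List.slice Mx2 (some ((length : Int) - 10)) none
    let format_inf2 := tail.foldl (fun s v => s ++ (PySem.Int.toStr v).toList) format_inf
    match pvInt2? format_inf2, pvInt2? "101010000010010".toList with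
    | some v, some key => pvFormat015b (v ^^^ key)
    | _, _ => ""

-- ===== PORT B =====
def get_format_inf_alt (mask : String) : String :=
  match pvInt2? ("01".toList ++ mask.toList) with
  | none => ""
  | some data =>
    let n : Nat := mask.toList.length + 2
    let d := (PySem.List.pyRange ((n : Int) - 1) (-1) (-1)).foldl pvStepB (data <<< 10)
    pvFormat015b (((data <<< 10) ||| d) ^^^ 21522)

-- ===== PRECONDITION & SPEC =====
-- Pre_ excludes exactly the masks containing a non-binary-digit character, on which A raises
-- ValueError (at int(c) for a non-digit, or at int(format_inf, 2) for larger digits).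
def Pre_get_format_inf (mask : String) : Prop :=
  (mask.toList.all (fun c => c == '0' || c == '1')) = true
instance (mask : String) : Decidable (Pre_get_format_inf mask) := by
  unfold Pre_get_format_inf; infer_instance

def pvWitness_get_format_inf : String := "101"

def Spec_get_format_inf (mask : String) (out : String) : Prop := out = get_format_inf_alt mask
instance (mask : String) (out : String) : Decidable (Spec_get_format_inf mask out) := by
  unfold Spec_get_format_inf; infer_instance

-- ===== CLAIM (what is proved, stated in full; the proofs are below) =====
def Claim_equal_get_format_inf : Prop :=
  ∀ (mask : String), Dom_get_format_inf mask → Pre_get_format_inf mask →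
    Spec_get_format_inf mask (get_format_inf mask)

-- ===== LEMMAS AND PROOFS =====
def pvBits (L : Nat) (v : Nat) : List Int :=
  (List.range L).map (fun k => if v.testBit (L - 1 - k) then (1 : Int) else 0)

theorem pvBits_length (L v : Nat) : (pvBits L v).length = L := by simp [pvBits]

theorem pvBits_getElem (L v p : Nat) (hp : p < (pvBits L v).length) :
    (pvBits L v)[p] = if v.testBit (L - 1 - p) then (1 : Int) else 0 := by
  simp [pvBits]

theorem pvBits_read (L v k : Nat) (hk : k < L) :
    PySem.List.pyGetD (pvBits L v) (k : Int) 0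
      = if v.testBit (L - 1 - k) then (1 : Int) else 0 := by
  rw [PySem.List.pyGetD_natCast, List.getD_eq_getElem _ _ (by simpa [pvBits_length]),
    pvBits_getElem]

theorem pvTestBit_one_shift (e e' : Nat) : (1 <<< e).testBit e' = decide (e' = e) := by
  rw [Nat.shiftLeft_eq, one_mul, Nat.testBit_two_pow]
  simp [eq_comm]

theorem pvTestBit_high (x n i : Nat) (h : x < 2 ^ n) (hi : n ≤ i) : x.testBit i = false :=
  Nat.testBit_eq_false_of_lt (lt_of_lt_of_le h (Nat.pow_le_pow_right (by norm_num) hi))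

theorem pvLt_of_top_clear (x n : Nat) (h : x < 2 ^ (n + 1)) (h2 : x.testBit n = false) :
    x < 2 ^ n := by
  apply Nat.lt_pow_two_of_testBit
  intro i hi
  rcases Nat.eq_or_lt_of_le hi with rfl | hlt
  · exact h2
  · exact pvTestBit_high x (n+1) i h hlt

-- one inner assignment Mx[k] ^= g, on the bit list of v
theorem pvStep_one (L v k : Nat) (g : Int) (hk : k < L) (hg : g = 0 ∨ g = 1) :
    PySem.List.pySetD (pvBits L v) (k : Int)
        (PySem.Int.bxor (PySem.List.pyGetD (pvBits L v) (k : Int) 0) g)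
      = pvBits L (v ^^^ (g.toNat <<< (L - 1 - k))) := by
  rw [pvBits_read L v k hk, PySem.List.pySetD_natCast]
  rcases hg with rfl | rfl
  · have h0 : v ^^^ ((0:Int).toNat <<< (L - 1 - k)) = v := by simp
    rw [h0]
    have hlen : k < (pvBits L v).length := by simpa [pvBits_length]
    have hval : (PySem.Int.bxor (if v.testBit (L - 1 - k) then (1:Int) else 0) 0)
        = (pvBits L v)[k] := by
      rw [pvBits_getElem]
      cases v.testBit (L - 1 - k) <;> simp
    rw [hval, List.set_getElem_self]
  · apply List.ext_getElem
    · simp [pvBits_length]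
    · intro p hp hp2
      have hpL : p < L := by simpa [pvBits_length] using hp2
      rw [List.getElem_set, pvBits_getElem, pvBits_getElem]
      have hsh : ∀ e', (((1:Int).toNat <<< (L - 1 - k)).testBit e') = decide (e' = L - 1 - k) := by
        intro e'; exact pvTestBit_one_shift _ _
      by_cases hpk : k = p
      · subst hpk
        rw [if_pos rfl, Nat.testBit_xor, hsh, decide_eq_true rfl]
        cases v.testBit (L - 1 - k) <;> decide
      · rw [if_neg hpk, Nat.testBit_xor, hsh,
          decide_eq_false (by omega : ¬ (L - 1 - p = L - 1 - k))]
        cases v.testBit (L - 1 - p) <;> decide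

theorem pvInner (L iN d : Nat) (hi : iN + 11 ≤ L) :
    (PySem.List.pyRange 0 11 1).foldl (pvStepInner (iN : Int)) (pvBits L d)
      = pvBits L (d ^^^ (pvG <<< (L - 11 - iN))) := by
  have hr : PySem.List.pyRange 0 11 1 = [0,1,2,3,4,5,6,7,8,9,10] := by decide
  rw [hr]
  simp only [List.foldl, pvStepInner]
  rw [show ((iN:Int) + 0) = ((iN+0 : Nat) : Int) by push_cast; ring]
  rw [show ((iN:Int) + 1) = ((iN+1 : Nat) : Int) by push_cast; ring]
  rw [show ((iN:Int) + 2) = ((iN+2 : Nat) : Int) by push_cast; ring]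
  rw [show ((iN:Int) + 3) = ((iN+3 : Nat) : Int) by push_cast; ring]
  rw [show ((iN:Int) + 4) = ((iN+4 : Nat) : Int) by push_cast; ring]
  rw [show ((iN:Int) + 5) = ((iN+5 : Nat) : Int) by push_cast; ring]
  rw [show ((iN:Int) + 6) = ((iN+6 : Nat) : Int) by push_cast; ring]
  rw [show ((iN:Int) + 7) = ((iN+7 : Nat) : Int) by push_cast; ring]
  rw [show ((iN:Int) + 8) = ((iN+8 : Nat) : Int) by push_cast; ring]
  rw [show ((iN:Int) + 9) = ((iN+9 : Nat) : Int) by push_cast; ring]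
  rw [show ((iN:Int) + 10) = ((iN+10 : Nat) : Int) by push_cast; ring]
  rw [show PySem.List.pyGetD pvGx 0 (0:Int) = 1 from by decide,
     show PySem.List.pyGetD pvGx 1 (0:Int) = 0 from by decide,
     show PySem.List.pyGetD pvGx 2 (0:Int) = 1 from by decide,
     show PySem.List.pyGetD pvGx 3 (0:Int) = 0 from by decide,
     show PySem.List.pyGetD pvGx 4 (0:Int) = 0 from by decide,
     show PySem.List.pyGetD pvGx 5 (0:Int) = 1 from by decide,
     show PySem.List.pyGetD pvGx 6 (0:Int) = 1 from by decide,
     show PySem.List.pyGetD pvGx 7 (0:Int) = 0 from by decide,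
     show PySem.List.pyGetD pvGx 8 (0:Int) = 1 from by decide,
     show PySem.List.pyGetD pvGx 9 (0:Int) = 1 from by decide,
     show PySem.List.pyGetD pvGx 10 (0:Int) = 1 from by decide]
  rw [pvStep_one L _ _ _ (by omega) (Or.inr rfl)]
  rw [pvStep_one L _ _ _ (by omega) (Or.inl rfl)]
  rw [pvStep_one L _ _ _ (by omega) (Or.inr rfl)]
  rw [pvStep_one L _ _ _ (by omega) (Or.inl rfl)]
  rw [pvStep_one L _ _ _ (by omega) (Or.inl rfl)]
  rw [pvStep_one L _ _ _ (by omega) (Or.inr rfl)]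
  rw [pvStep_one L _ _ _ (by omega) (Or.inr rfl)]
  rw [pvStep_one L _ _ _ (by omega) (Or.inl rfl)]
  rw [pvStep_one L _ _ _ (by omega) (Or.inr rfl)]
  rw [pvStep_one L _ _ _ (by omega) (Or.inr rfl)]
  rw [pvStep_one L _ _ _ (by omega) (Or.inr rfl)]
  simp only [Int.toNat_one, Int.toNat_zero, Nat.zero_shiftLeft, Nat.xor_zero]
  congr 1
  rw [show L - 1 - (iN+0) = (L-11-iN) + 10 by omega,
      show L - 1 - (iN+2) = (L-11-iN) + 8 by omega,
      show L - 1 - (iN+5) = (L-11-iN) + 5 by omega,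
      show L - 1 - (iN+6) = (L-11-iN) + 4 by omega,
      show L - 1 - (iN+8) = (L-11-iN) + 2 by omega,
      show L - 1 - (iN+9) = (L-11-iN) + 1 by omega,
      show L - 1 - (iN+10) = (L-11-iN) + 0 by omega]
  generalize (L - 11 - iN) = s
  have hsc : ∀ c, (1:Nat) <<< (s + c) = (1 <<< c) <<< s := fun c => by
    rw [Nat.add_comm, Nat.shiftLeft_add]
  simp only [hsc]
  simp only [Nat.xor_assoc]
  congr 1
  simp only [← Nat.shiftLeft_xor_distrib]
  congr 1

theorem pvStepAB (L i d : Nat) (hi : i + 11 ≤ L) :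
    pvStepA (pvBits L d) (i : Int) = pvBits L (pvStepB d ((L - 11 - i : Nat) : Int)) := by
  unfold pvStepA pvStepB
  rw [pvBits_read L d i (by omega)]
  simp only [Int.toNat_natCast]
  rw [show (L - 11 - i) + 10 = L - 1 - i by omega]
  have hcond : ((d >>> (L - 1 - i)) &&& 1 = 1) ↔ d.testBit (L - 1 - i) := by
    simp [Nat.testBit]
  cases hb : d.testBit (L - 1 - i)
  · rw [if_neg (by simp), if_neg (by rw [hcond, hb]; simp)]
  · rw [if_pos (by simp), if_pos (by rw [hcond, hb])]
    exact pvInner L i d hi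

theorem pvLoops (L : Nat) (k : Nat) (hk : k + 10 ≤ L) : ∀ d : Nat,
    (PySem.List.pyRange ((L : Int) - 10 - (k : Int)) ((L : Int) - 10) 1).foldl pvStepA (pvBits L d)
      = pvBits L ((PySem.List.pyRange ((k : Int) - 1) (-1) (-1)).foldl pvStepB d) := by
  induction k with
  | zero =>
    intro d
    rw [PySem.List.pyRange_one_eq_nil (by omega), PySem.List.pyRange_neg_one_eq_nil (by omega)]
    rfl
  | succ k ih =>
    intro d
    rw [PySem.List.pyRange_one_cons (by omega), PySem.List.pyRange_neg_one_cons (by omega)]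
    simp only [List.foldl_cons]
    have h1 : ((L : Int) - 10 - ((k:Nat)+1 : Nat)) = ((L - 11 - k : Nat) : Int) := by push_cast; omega
    have h2 : (((k:Nat)+1 : Nat) : Int) - 1 = (k : Int) := by omega
    rw [h1, h2]
    have h3 : ((k : Nat) : Int) = ((L - 11 - (L - 11 - k) : Nat) : Int) := by omega
    rw [h3, pvStepAB L (L - 11 - k) d (by omega), ← h3]
    have h4 : ((L - 11 - k : Nat) : Int) + 1 = (L : Int) - 10 - (k : Int) := by omega
    rw [h4, ih (by omega)]

theorem pvRemBound (k : Nat) : ∀ d : Nat, d < 2 ^ (k + 10) →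
    (PySem.List.pyRange ((k : Int) - 1) (-1) (-1)).foldl pvStepB d < 2 ^ 10 := by
  induction k with
  | zero =>
    intro d hd
    rw [PySem.List.pyRange_neg_one_eq_nil (by omega)]
    simpa using hd
  | succ k ih =>
    intro d hd
    rw [PySem.List.pyRange_neg_one_cons (by omega)]
    simp only [List.foldl_cons]
    rw [show (((k:Nat)+1 : Nat) : Int) - 1 = (k : Int) by push_cast; omega]
    apply ih
    unfold pvStepB
    simp only [Int.toNat_natCast]
    have hcond : ((d >>> (k + 10)) &&& 1 = 1) ↔ d.testBit (k + 10) := by simp [Nat.testBit]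
    cases hb : d.testBit (k + 10)
    · rw [if_neg (by rw [hcond, hb]; simp)]
      exact pvLt_of_top_clear d (k+10) hd hb
    · rw [if_pos (by rw [hcond, hb])]
      apply pvLt_of_top_clear
      · have h2 : pvG <<< k < 2 ^ (k + 10 + 1) := by
          have hg : pvG < 2 ^ 11 := by decide
          calc pvG <<< k = pvG * 2 ^ k := by rw [Nat.shiftLeft_eq]
          _ < 2 ^ 11 * 2 ^ k := Nat.mul_lt_mul_of_lt_of_le hg (le_refl _) (Nat.pow_pos (by norm_num))
          _ = 2 ^ (k + 10 + 1) := by rw [← Nat.pow_add]; ring_nf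
        exact Nat.xor_lt_two_pow hd h2
      · rw [Nat.testBit_xor, hb]
        have : (pvG <<< k).testBit (k + 10) = true := by
          rw [Nat.shiftLeft_eq, Nat.testBit_mul_two_pow]
          simp
          decide
        rw [this]
        rfl

def pvDigit (c : Char) : Int := if c == '1' then 1 else 0
def pvValC (s : List Char) : Nat := s.foldl (fun a c => 2 * a + (if c == '1' then 1 else 0)) 0
def pvCharOf (v : Int) : Char := if v == 1 then '1' else '0'

theorem pvValC_go (u : List Char) : ∀ a : Nat,
    u.foldl (fun a c => 2 * a + (if c == '1' then 1 else 0)) a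
      = a * 2 ^ u.length + pvValC u := by
  induction u with
  | nil => intro a; simp [pvValC]
  | cons c u ih =>
    intro a
    simp only [List.foldl_cons, pvValC, List.length_cons]
    rw [ih, ih (2 * 0 + _)]
    ring

theorem pvValC_append (u w : List Char) :
    pvValC (u ++ w) = pvValC u * 2 ^ w.length + pvValC w := by
  simp only [pvValC, List.foldl_append]
  rw [pvValC_go]
  rfl

theorem pvValC_snoc (u : List Char) (c : Char) :
    pvValC (u ++ [c]) = 2 * pvValC u + (if c == '1' then 1 else 0) := by
  rw [pvValC_append]
  simp [pvValC]
  ring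

theorem pvValC_lt (u : List Char) : pvValC u < 2 ^ u.length := by
  induction u using List.reverseRecOn with
  | nil => simp [pvValC]
  | append_singleton u c ih =>
    rw [pvValC_snoc]
    simp only [List.length_append, List.length_cons, List.length_nil]
    have : 2 ^ (u.length + 1) = 2 * 2 ^ u.length := by ring
    rw [this]
    split <;> omega

theorem pvBits_snoc (n v b : Nat) (hb : b < 2) :
    pvBits (n + 1) (2 * v + b) = pvBits n v ++ [(b : Int)] := by
  apply List.ext_getElem
  · simp [pvBits_length]
  · intro p hp hp2
    have hpn : p < n + 1 := by simpa [pvBits_length] using hp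
    rw [pvBits_getElem]
    rcases Nat.lt_or_ge p n with h | h
    · rw [List.getElem_append_left (by simpa [pvBits_length]), pvBits_getElem]
      have he : n + 1 - 1 - p = (n - 1 - p) + 1 := by omega
      rw [he, Nat.testBit_add_one]
      have : (2 * v + b) / 2 = v := by omega
      rw [this]
    · have hpe : p = n := by omega
      subst hpe
      rw [List.getElem_append_right (by simp [pvBits_length])]
      simp [pvBits_length, Nat.testBit_zero]
      interval_cases b <;> simp

theorem pvMap_digit_eq_bits (u : List Char) (h : ∀ c ∈ u, c = '0' ∨ c = '1') :
    u.map pvDigit = pvBits u.length (pvValC u) := by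
  induction u using List.reverseRecOn with
  | nil => simp [pvBits, pvValC]
  | append_singleton u c ih =>
    have hu : ∀ c ∈ u, c = '0' ∨ c = '1' := fun x hx => h x (by simp [hx])
    rw [List.map_append, ih hu, pvValC_snoc]
    simp only [List.length_append, List.length_cons, List.length_nil]
    rw [pvBits_snoc _ _ _ (by split <;> omega)]
    rcases h c (by simp) with rfl | rfl <;> simp [pvDigit]

-- v < 2^w: the first p entries of the (p+w)-bit list are zeros
theorem pvBits_low (p w v : Nat) (hv : v < 2 ^ w) :
    pvBits (p + w) v = List.replicate p (0 : Int) ++ pvBits w v := by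
  apply List.ext_getElem
  · simp [pvBits_length]
  · intro q hq hq2
    have hqp : q < p + w := by simpa [pvBits_length] using hq
    rw [pvBits_getElem]
    rcases Nat.lt_or_ge q p with h | h
    · rw [List.getElem_append_left (by simpa)]
      rw [List.getElem_replicate]
      rw [pvTestBit_high v w _ hv (by omega)]
      simp
    · rw [List.getElem_append_right (by simp only [List.length_replicate]; omega)]
      rw [pvBits_getElem]
      simp only [List.length_replicate]
      have he : p + w - 1 - q = w - 1 - (q - p) := by omega
      rw [he]

-- v < 2^w: appending p zero bits is the (w+p)-bit list of v <<< p
theorem pvBits_shift (w p v : Nat) :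
    pvBits (w + p) (v <<< p) = pvBits w v ++ List.replicate p (0 : Int) := by
  apply List.ext_getElem
  · simp [pvBits_length]
  · intro q hq hq2
    have hqp : q < w + p := by simpa [pvBits_length] using hq
    rw [pvBits_getElem, Nat.testBit_shiftLeft]
    rcases Nat.lt_or_ge q w with h | h
    · rw [List.getElem_append_left (by simpa [pvBits_length]), pvBits_getElem]
      have h1 : p ≤ w + p - 1 - q := by omega
      have h2 : w + p - 1 - q - p = w - 1 - q := by omega
      simp [h1, h2]
    · rw [List.getElem_append_right (by simp [pvBits_length]; omega)]
      rw [List.getElem_replicate]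
      have h1 : ¬ (p ≤ w + p - 1 - q) := by omega
      simp [h1]

theorem pvBits_inj (w v v' : Nat) (hv : v < 2 ^ w) (hv' : v' < 2 ^ w)
    (h : pvBits w v = pvBits w v') : v = v' := by
  apply Nat.eq_of_testBit_eq
  intro i
  rcases Nat.lt_or_ge i w with hi | hi
  · have hp : w - 1 - i < w := by omega
    have := congrArg (fun l => l[w - 1 - i]?) h
    simp only [pvBits, List.getElem?_map, List.getElem?_range, hp] at this
    have he : w - 1 - (w - 1 - i) = i := by omega
    simp only [Option.map_some, he] at this
    by_cases hb : v.testBit i <;> by_cases hb' : v'.testBit i <;>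
      simp [hb, hb'] at this ⊢
  · rw [pvTestBit_high v w i hv hi, pvTestBit_high v' w i hv' hi]

theorem pvInt2?_eq (s : List Char) (hne : s ≠ []) (h : ∀ c ∈ s, c = '0' ∨ c = '1') :
    pvInt2? s = some (pvValC s) := by
  unfold pvInt2?
  rw [if_pos]
  · rfl
  · refine ⟨hne, ?_⟩
    rw [List.all_eq_true]
    intro c hc
    rcases h c hc with rfl | rfl <;> decide

theorem pvBuild (u : List Char) (h : ∀ c ∈ u, c = '0' ∨ c = '1') : ∀ l : List Int,
    u.foldl (fun acc c => acc.bind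
        (fun l => (PySem.Int.ofStr? (String.ofList [c])).map (fun v => l ++ [v]))) (some l)
      = some (l ++ u.map pvDigit) := by
  induction u with
  | nil => intro l; simp
  | cons c u ih =>
    intro l
    have hc : PySem.Int.ofStr? (String.ofList [c]) = some (pvDigit c) := by
      rcases h c (by simp) with rfl | rfl <;> decide
    simp only [List.foldl_cons, hc, Option.bind_some, Option.map_some]
    rw [ih (fun x hx => h x (by simp [hx]))]
    simp

theorem pvPad (l : List Int) :
    (PySem.List.pyRange 0 10 1).foldl (fun l _ => l ++ [(0 : Int)]) l
      = l ++ List.replicate 10 0 := by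
  have hr : PySem.List.pyRange 0 10 1 = [0,1,2,3,4,5,6,7,8,9] := by decide
  rw [hr]
  simp [List.foldl, List.append_assoc]

theorem pvStrFold (t : List Int) (h : ∀ v ∈ t, v = 0 ∨ v = 1) : ∀ acc : List Char,
    t.foldl (fun s v => s ++ (PySem.Int.toStr v).toList) acc = acc ++ t.map pvCharOf := by
  induction t with
  | nil => intro acc; simp
  | cons v t ih =>
    intro acc
    have hv : (PySem.Int.toStr v).toList = [pvCharOf v] := by
      rcases h v (by simp) with rfl | rfl <;> decide
    simp only [List.foldl_cons, hv, List.map_cons]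
    rw [ih (fun x hx => h x (by simp [hx]))]
    simp

theorem pvBits_mem (L v : Nat) : ∀ x ∈ pvBits L v, x = 0 ∨ x = 1 := by
  intro x hx
  simp only [pvBits, List.mem_map] at hx
  obtain ⟨k, _, hk⟩ := hx
  split at hk <;> omega

theorem pvCharOf_binary (v : Int) : pvCharOf v = '0' ∨ pvCharOf v = '1' := by
  unfold pvCharOf
  split <;> simp

theorem pvDigit_charOf (v : Int) (h : v = 0 ∨ v = 1) : pvDigit (pvCharOf v) = v := by
  rcases h with rfl | rfl <;> decide

theorem pvValC_bits (w v : Nat) (hv : v < 2 ^ w) :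
    pvValC ((pvBits w v).map pvCharOf) = v := by
  have hlen : ((pvBits w v).map pvCharOf).length = w := by simp [pvBits_length]
  have hbin : ∀ c ∈ (pvBits w v).map pvCharOf, c = '0' ∨ c = '1' := by
    intro c hc
    simp only [List.mem_map] at hc
    obtain ⟨x, _, rfl⟩ := hc
    exact pvCharOf_binary x
  have h1 := pvMap_digit_eq_bits _ hbin
  rw [hlen] at h1
  have h2 : ((pvBits w v).map pvCharOf).map pvDigit = pvBits w v := by
    rw [List.map_map]
    conv_rhs => rw [← List.map_id (pvBits w v)]
    apply List.map_congr_left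
    intro x hx
    exact pvDigit_charOf x (pvBits_mem w v x hx)
  exact pvBits_inj w _ v (by have h0 := pvValC_lt ((pvBits w v).map pvCharOf); rwa [hlen] at h0) hv (h1.symm.trans h2)

theorem pvMain (mask : String) (hpre : ∀ c ∈ mask.toList, c = '0' ∨ c = '1') :
    get_format_inf mask = get_format_inf_alt mask := by
  unfold get_format_inf get_format_inf_alt
  have hbin : ∀ c ∈ ('0' :: '1' :: mask.toList), c = '0' ∨ c = '1' := by
    intro c hc
    rcases List.mem_cons.mp hc with rfl | hc
    · left; rfl
    rcases List.mem_cons.mp hc with rfl | hc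
    · right; rfl
    exact hpre c hc
  have hfcheq : ("01" : String).toList ++ mask.toList = '0' :: '1' :: mask.toList := rfl
  simp only [hfcheq, pvBuild _ hbin, List.nil_append, pvPad]
  rw [pvInt2?_eq _ (by simp) hbin]
  have h_len : (List.map pvDigit ('0' :: '1' :: mask.toList) ++ List.replicate 10 (0:Int)).length
      = mask.toList.length + 12 := by simp
  rw [h_len]
  have h_map : List.map pvDigit ('0' :: '1' :: mask.toList)
      = pvBits (mask.toList.length + 2) (pvValC ('0' :: '1' :: mask.toList)) := by
    have := pvMap_digit_eq_bits _ hbin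
    simpa using this
  rw [h_map, ← pvBits_shift]
  rw [show mask.toList.length + 2 + 10 = mask.toList.length + 12 from by omega]
  have hrange : PySem.List.pyRange 0 (((mask.toList.length + 12 : Nat) : Int) - 10) 1
      = PySem.List.pyRange (((mask.toList.length + 12 : Nat) : Int) - 10 - ((mask.toList.length + 2 : Nat) : Int))
          (((mask.toList.length + 12 : Nat) : Int) - 10) 1 := by
    congr 1
    push_cast
    omega
  rw [hrange, pvLoops (mask.toList.length + 12) (mask.toList.length + 2) (by omega)]
  have hdatalt : pvValC ('0' :: '1' :: mask.toList) < 2 ^ (mask.toList.length + 2) := by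
    have h := pvValC_lt ('0' :: '1' :: mask.toList)
    rwa [show ('0' :: '1' :: mask.toList).length = mask.toList.length + 2 from by
      rw [List.length_cons, List.length_cons]] at h
  have hshlt : pvValC ('0' :: '1' :: mask.toList) <<< 10 < 2 ^ (mask.toList.length + 2 + 10) := by
    rw [Nat.shiftLeft_eq, Nat.pow_add]
    exact Nat.mul_lt_mul_of_lt_of_le hdatalt (le_refl _) (Nat.pow_pos (by norm_num))
  have hrem := pvRemBound (mask.toList.length + 2) _ hshlt
  set rem : Nat := (PySem.List.pyRange (((mask.toList.length + 2 : Nat) : Int) - 1) (-1) (-1)).foldl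
      pvStepB (pvValC ('0' :: '1' :: mask.toList) <<< 10) with hremdef
  rw [show ((((mask.toList.length + 12) : Nat) : Int) - 10) = (((mask.toList.length + 2 : Nat)) : Int)
      from by push_cast; omega]
  rw [PySem.List.slice_from_natCast]
  rw [show mask.toList.length + 12 = (mask.toList.length + 2) + 10 from by omega]
  rw [pvBits_low _ _ _ hrem]
  rw [List.drop_left' (by rw [List.length_replicate])]
  rw [pvStrFold _ (pvBits_mem _ _)]
  have hbin2 : ∀ c ∈ ('0' :: '1' :: mask.toList) ++ (pvBits 10 rem).map pvCharOf, c = '0' ∨ c = '1' := by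
    intro c hc
    rcases List.mem_append.mp hc with hc | hc
    · exact hbin c hc
    · simp only [List.mem_map] at hc
      obtain ⟨x, _, rfl⟩ := hc
      exact pvCharOf_binary x
  rw [pvInt2?_eq _ (by simp) hbin2]
  rw [show pvInt2? "101010000010010".toList = some 21522 from by decide]
  rw [pvValC_append]
  rw [pvValC_bits _ _ hrem]
  simp only [List.length_map, pvBits_length]
  have hor : ∀ (a b : Nat), b < 2 ^ 10 → a <<< 10 ||| b = a * 2 ^ 10 + b := by
    intro a b hb
    rw [Nat.shiftLeft_eq, Nat.mul_comm, ← Nat.two_pow_add_eq_or_of_lt hb, Nat.mul_comm]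
  rw [hor _ _ hrem]

-- ===== VERDICT (by name: the statement is the Claim_ definition above) =====
theorem get_format_inf_spec : Claim_equal_get_format_inf := by
  intro mask _hdom hpre
  unfold Spec_get_format_inf
  refine pvMain mask ?_
  intro c hc
  have := List.all_eq_true.mp hpre c hc
  rcases Bool.or_eq_true _ _ |>.mp this with h | h
  · exact Or.inl (by simpa using h)
  · exact Or.inr (by simpa using h)
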